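-- pv_equiv track=rewrite | github.com/kr-MATAGI/Coding-Test-2025 | Programmers/pg_주사위고르기.py | solution
-- ===== SOURCE A (Python) =====
-- from itertools import combinations, product
-- from typing import List
-- from collections import Counter
--
-- def solution(dice: List[List[int]]) -> List[int]:
--     n = len(dice)                 # 주사위 개수
--     half = n // 2                 # A, B가 각각 가질 주사위 개수
--     dice_idx = list(range(n))    # 주사위 인덱스 (0부터 n-1까지)
--     max_win = -1                 # A의 최대 승리 횟수 저장용
--     best_combo = []              # A가 선택할 최적 주사위 조합
--
--     # A가 고를 수 있는 모든 주사위 조합을 순회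
--     for a_dice in combinations(dice_idx, half):
--         b_dice = [i for i in dice_idx if i not in a_dice]  # B는 나머지 주사위 선택
--
--         # 해당 조합에서 주사위로 나올 수 있는 모든 점수 합을 구하는 함수
--         def get_all_sums(dice_group):
--             all_rolls = list(product(*[dice[i] for i in dice_group]))  # 각 주사위의 눈을 곱집합으로 생성
--             sums = [sum(tup) for tup in all_rolls]                     # 각 경우의 점수 합
--             return Counter(sums)  # 각 합이 몇 번 나오는지 세어줌 (딕셔너리 형태)
--
--         a_sums = get_all_sums(a_dice)  # A가 낼 수 있는 모든 점수 합 분포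
--         b_sums = get_all_sums(b_dice)  # B가 낼 수 있는 모든 점수 합 분포
--
--         # B의 점수들을 오름차순 정렬하고 누적합 계산
--         # → A가 특정 점수를 냈을 때, 그보다 낮은 B의 점수가 몇 개나 되는지 빠르게 알기 위함
--         b_keys_sorted = sorted(b_sums)
--         b_cum = []
--         b_total = 0
--         for k in b_keys_sorted:
--             b_total += b_sums[k]
--             b_cum.append((k, b_total))
--
--         # A가 이기는 경우의 수 계산
--         win_count = 0
--         for a_score, a_count in a_sums.items():
--             # A 점수보다 낮은 B 점수에 대해서만 승리 가능
--             for b_score, _ in b_cum: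
--                 if b_score >= a_score:
--                     break
--                 win_count += a_count * b_sums[b_score]
--                 # A가 해당 점수를 낼 경우, B가 b_score을 낼 확률만큼 승리 횟수 누적
--
--         # 지금까지 중 가장 높은 승리 수라면 저장
--         if win_count > max_win:
--             max_win = win_count
--             best_combo = list(a_dice)
--
--     # 결과는 1-indexed로 정답 출력
--     return [i + 1 for i in sorted(best_combo)]
-- ===== SOURCE B (Python) =====
-- from itertools import combinations
-- from typing import List
-- from collections import Counter
--
--
-- def _sums(dice, idx):
--     # multiset of attainable totals, built by iterated extension (no itertools.product)
--     sums = [0]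
--     for i in idx:
--         sums = [s + f for s in sums for f in dice[i]]
--     return sums
--
--
-- def solution(dice: List[List[int]]) -> List[int]:
--     n = len(dice)
--     half = n // 2
--     max_win = -1
--     best = []
--     for a_idx in combinations(range(n), half):
--         b_idx = [i for i in range(n) if i not in a_idx]
--         a_cnt = Counter(_sums(dice, a_idx))
--         b_cnt = Counter(_sums(dice, b_idx))
--         a_keys = sorted(a_cnt)
--         b_keys = sorted(b_cnt)
--         # one merge pass over the two sorted key lists: 'below' is the number of
--         # B rolls strictly below the current A total
--         wins = 0
--         j = 0
--         below = 0
--         for a in a_keys: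
--             while j < len(b_keys) and b_keys[j] < a:
--                 below += b_cnt[b_keys[j]]
--                 j += 1
--             wins += a_cnt[a] * below
--         if wins > max_win:
--             max_win = wins
--             best = list(a_idx)
--     return [i + 1 for i in sorted(best)]
-- ===== Notes on version B (the rewrite author's own statement) =====
-- stated objective: faster
-- what changed: Per combination, B builds the score multisets by iterated list extension instead of itertools.product and counts A's winning pairs with a single two-pointer merge pass over the two sorted distinct-score lists, instead of A's inner rescan of B's sorted score list for every distinct A score.
import Mathlib
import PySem

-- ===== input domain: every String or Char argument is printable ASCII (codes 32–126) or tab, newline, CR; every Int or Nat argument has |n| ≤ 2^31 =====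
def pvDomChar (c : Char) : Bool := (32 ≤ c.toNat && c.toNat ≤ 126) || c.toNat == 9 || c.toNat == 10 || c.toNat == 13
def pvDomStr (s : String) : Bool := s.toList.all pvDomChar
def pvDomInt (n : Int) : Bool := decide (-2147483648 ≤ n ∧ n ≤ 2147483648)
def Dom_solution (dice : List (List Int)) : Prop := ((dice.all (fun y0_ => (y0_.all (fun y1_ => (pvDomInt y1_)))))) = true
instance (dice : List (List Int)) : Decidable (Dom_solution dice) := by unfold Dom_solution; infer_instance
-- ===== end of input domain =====

-- B replaces A's per-A-score rescan of B's sorted score list by a single two-pointer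
-- merge pass over the two sorted distinct-score lists, and builds the score multisets
-- by iterated extension instead of itertools.product.

-- ===== PORT A =====

-- itertools.product(*ls) (leftmost factor varies slowest), exact by hand
def pyProduct {α : Type} (ls : List (List α)) : List (List α) :=
  match ls with
  | [] => [[]]
  | l :: rest => l.flatMap (fun x => (pyProduct rest).map (x :: ·))

-- A's get_all_sums: Counter of the sums of the cartesian product of the chosen dice
def getAllSumsA (dice : List (List Int)) (group : List Int) : PySem.Dict Int Int :=
  let allRolls := pyProduct (group.map (fun i => PySem.List.pyGetD dice i []))
  let sums := allRolls.map (fun t => t.sum)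
  PySem.Dict.counter sums

-- A's inner 'for b_score, _ in b_cum: if b_score >= a_score: break; win_count += …'
def winInnerA (aScore aCount : Int) (bSums : PySem.Dict Int Int) :
    List (Int × Int) → Int → Int
  | [], acc => acc
  | (bScore, _) :: rest, acc =>
      if bScore ≥ aScore then acc
      else winInnerA aScore aCount bSums rest (acc + aCount * bSums.getD bScore 0)

def solution (dice : List (List Int)) : List Int :=
  let n : Int := dice.length
  let half : Nat := dice.length / 2
  let diceIdx := PySem.List.pyRange 0 n 1
  let st := (PySem.List.combinations diceIdx half).foldl
    (fun (st : Int × List Int) aDice =>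
      let bDice := diceIdx.filter (fun i => !aDice.contains i)
      let aSums := getAllSumsA dice aDice
      let bSums := getAllSumsA dice bDice
      let bKeysSorted := PySem.List.sorted bSums.keys (fun k => k) false
      let bCum := (bKeysSorted.foldl (fun (p : List (Int × Int) × Int) k =>
          (p.1 ++ [(k, p.2 + bSums.getD k 0)], p.2 + bSums.getD k 0)) ([], 0)).1
      let winCount := aSums.items.foldl (fun acc kv => winInnerA kv.1 kv.2 bSums bCum acc) 0
      if winCount > st.1 then (winCount, aDice) else st) (-1, [])
  (PySem.List.sorted st.2 (fun k => k) false).map (fun i => i + 1)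

-- ===== PORT B =====

-- B's _sums: iterated extension of the multiset of attainable totals
def sumsOfB (dice : List (List Int)) (idx : List Int) : List Int :=
  idx.foldl (fun sums i => sums.flatMap (fun s => (PySem.List.pyGetD dice i []).map (fun f => s + f))) [0]

-- B's 'while j < len(b_keys) and b_keys[j] < a: below += b_cnt[b_keys[j]]; j += 1'
def advanceB (bKeys : List Int) (bCnt : PySem.Dict Int Int) (a : Int) (j : Nat) (below : Int) :
    Nat × Int :=
  if h : j < bKeys.length then
    if bKeys[j] < a then advanceB bKeys bCnt a (j + 1) (below + bCnt.getD bKeys[j] 0)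
    else (j, below)
  else (j, below)
  termination_by bKeys.length - j

def solution_alt (dice : List (List Int)) : List Int :=
  let n : Int := dice.length
  let half : Nat := dice.length / 2
  let st := (PySem.List.combinations (PySem.List.pyRange 0 n 1) half).foldl
    (fun (st : Int × List Int) aIdx =>
      let bIdx := (PySem.List.pyRange 0 n 1).filter (fun i => !aIdx.contains i)
      let aCnt := PySem.Dict.counter (sumsOfB dice aIdx)
      let bCnt := PySem.Dict.counter (sumsOfB dice bIdx)
      let aKeys := PySem.List.sorted aCnt.keys (fun k => k) false
      let bKeys := PySem.List.sorted bCnt.keys (fun k => k) false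
      let w := aKeys.foldl (fun (s : Nat × Int × Int) a =>
          let jb := advanceB bKeys bCnt a s.1 s.2.1
          (jb.1, jb.2, s.2.2 + aCnt.getD a 0 * jb.2)) (0, 0, 0)
      if w.2.2 > st.1 then (w.2.2, aIdx) else st) (-1, [])
  (PySem.List.sorted st.2 (fun k => k) false).map (fun i => i + 1)

-- ===== PRECONDITION & SPEC =====
def Spec_solution (dice : List (List Int)) (out : List Int) : Prop := out = solution_alt dice
instance (dice : List (List Int)) (out : List Int) : Decidable (Spec_solution dice out) := by unfold Spec_solution; infer_instance

-- ===== CLAIM (what is proved, stated in full; the proofs are below) =====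
def Claim_equal_solution : Prop := ∀ (dice : List (List Int)), Dom_solution dice → Spec_solution dice (solution dice)

-- ===== LEMMAS AND PROOFS =====

-- count weighted by dict values of the '< a' prefix of a key list
def keyCntS (d : PySem.Dict Int Int) (ks : List Int) (a : Int) : Int :=
  ((ks.takeWhile (fun k => decide (k < a))).map (fun k => d.getD k 0)).sum

-- B's sums list is the sums of A's cartesian product
theorem sumsOfB_fold (dice : List (List Int)) (g : List Int) : ∀ (acc : List Int),
    g.foldl (fun sums i => sums.flatMap (fun s => (PySem.List.pyGetD dice i []).map (fun f => s + f))) acc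
      = acc.flatMap (fun s => (pyProduct (g.map (fun i => PySem.List.pyGetD dice i []))).map (fun t => s + t.sum)) := by
  induction g with
  | nil => intro acc; simp [pyProduct]
  | cons i g ih =>
      intro acc
      simp only [List.foldl_cons, ih, pyProduct, List.map_cons, List.flatMap_assoc,
        List.map_flatMap, List.flatMap_map, List.map_map]
      congr 1; funext s; congr 1; funext x
      simp [Function.comp, add_assoc]

theorem sumsOfB_eq (dice : List (List Int)) (g : List Int) :
    sumsOfB dice g = (pyProduct (g.map (fun i => PySem.List.pyGetD dice i []))).map (fun t => t.sum) := by
  simp [sumsOfB, sumsOfB_fold]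

-- A's break-loop depends only on the key column of b_cum
theorem winInnerA_eq (a c : Int) (d : PySem.Dict Int Int) : ∀ (ps : List (Int × Int)) (acc : Int),
    winInnerA a c d ps acc = acc + c * keyCntS d (ps.map Prod.fst) a := by
  intro ps
  induction ps with
  | nil => intro acc; simp [winInnerA, keyCntS]
  | cons p rest ih =>
      intro acc
      obtain ⟨k, v⟩ := p
      by_cases h : k ≥ a
      · have hd : decide (k < a) = false := by simp; omega
        simp [winInnerA, h, keyCntS, hd]
      · have hd : decide (k < a) = true := by simp; omega
        simp only [winInnerA, if_neg h, ih, keyCntS, List.map_cons, List.takeWhile_cons, hd]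
        simp
        ring

-- the key column of A's b_cum accumulator is the sorted key list
theorem bCum_keys (d : PySem.Dict Int Int) : ∀ (ks : List Int) (p : List (Int × Int)) (t : Int),
    (((ks.foldl (fun (p : List (Int × Int) × Int) k =>
        (p.1 ++ [(k, p.2 + d.getD k 0)], p.2 + d.getD k 0)) (p, t)).1).map Prod.fst
      = p.map Prod.fst ++ ks) := by
  intro ks
  induction ks with
  | nil => intro p t; simp
  | cons k ks ih => intro p t; simp [List.foldl_cons, ih]

-- the while loop consumes exactly the '< a' run starting at j
theorem advanceB_eq (d : PySem.Dict Int Int) (bKeys : List Int) (a : Int) :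
    ∀ (j : Nat) (below : Int),
    advanceB bKeys d a j below
      = (j + ((bKeys.drop j).takeWhile (fun k => decide (k < a))).length,
         below + (((bKeys.drop j).takeWhile (fun k => decide (k < a))).map (fun k => d.getD k 0)).sum) := by
  have main : ∀ (n j : Nat) (below : Int), bKeys.length - j ≤ n →
      advanceB bKeys d a j below
        = (j + ((bKeys.drop j).takeWhile (fun k => decide (k < a))).length,
           below + (((bKeys.drop j).takeWhile (fun k => decide (k < a))).map (fun k => d.getD k 0)).sum) := by
    intro n
    induction n with
    | zero =>
        intro j below hn
        have hge : bKeys.length ≤ j := by omega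
        rw [advanceB]
        simp [List.drop_eq_nil_of_le hge, Nat.not_lt.mpr hge]
    | succ n ih =>
        intro j below hn
        by_cases h : j < bKeys.length
        · have hdrop : bKeys.drop j = bKeys[j] :: bKeys.drop (j + 1) := List.drop_eq_getElem_cons h
          rw [advanceB]
          simp only [dif_pos h]
          by_cases hlt : bKeys[j] < a
          · have hd : decide (bKeys[j] < a) = true := by simpa using hlt
            rw [if_pos hlt, ih (j + 1) _ (by omega), hdrop]
            simp only [List.takeWhile_cons, hd]
            refine Prod.ext ?_ ?_
            · simp; omega
            · simp; ring
          · have hd : decide (bKeys[j] < a) = false := by simpa using hlt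
            rw [if_neg hlt, hdrop]
            simp only [List.takeWhile_cons, hd]
            simp
        · have hge : bKeys.length ≤ j := by omega
          rw [advanceB]
          simp [List.drop_eq_nil_of_le hge, Nat.not_lt.mpr hge]
  intro j below
  exact main (bKeys.length - j) j below le_rfl

-- prefix splitting of takeWhile
theorem takeWhile_split {α : Type} (p : α → Bool) : ∀ (l : List α) (j : Nat),
    j ≤ l.length → (∀ k ∈ l.take j, p k = true) →
    l.takeWhile p = l.take j ++ (l.drop j).takeWhile p := by
  intro l
  induction l with
  | nil => intro j _ _; simp
  | cons x l ih =>
      intro j hj hall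
      cases j with
      | zero => simp
      | succ j =>
          have hx : p x = true := hall x (by simp)
          simp only [List.take_succ_cons, List.drop_succ_cons, List.takeWhile_cons, hx,
            List.cons_append]
          rw [ih j (by simpa using hj) (fun k hk => hall k (by simp [hk]))]
          simp

-- B's merge loop computes the weighted-prefix sum for every key, in order
theorem mergeLoop_eq (bKeys : List Int) (d aCnt : PySem.Dict Int Int) :
    ∀ (as_ : List Int) (j : Nat) (below w : Int),
    as_.Pairwise (· ≤ ·) → j ≤ bKeys.length →
    (∀ k ∈ bKeys.take j, ∀ a ∈ as_, k < a) →
    below = ((bKeys.take j).map (fun k => d.getD k 0)).sum →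
    (as_.foldl (fun (s : Nat × Int × Int) a =>
        let jb := advanceB bKeys d a s.1 s.2.1
        (jb.1, jb.2, s.2.2 + aCnt.getD a 0 * jb.2)) (j, below, w)).2.2
      = w + (as_.map (fun a => aCnt.getD a 0 * keyCntS d bKeys a)).sum := by
  intro as_
  induction as_ with
  | nil => intro j below w _ _ _ _; simp
  | cons a as' ih =>
      intro j below w hpw hj hlt hbe
      obtain ⟨hle, hpw'⟩ := List.pairwise_cons.mp hpw
      have hsplit : bKeys.takeWhile (fun k => decide (k < a)) = bKeys.take j
          ++ (bKeys.drop j).takeWhile (fun k => decide (k < a)) :=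
        takeWhile_split _ bKeys j hj
          (fun k hk => by simpa using hlt k hk a (List.mem_cons_self))
      have htakelen : (bKeys.take j).length = j := by simp [List.length_take, Nat.min_eq_left hj]
      have hlen : j + ((bKeys.drop j).takeWhile (fun k => decide (k < a))).length
          = (bKeys.takeWhile (fun k => decide (k < a))).length := by
        rw [hsplit]; simp [htakelen]
      have htake : bKeys.take (j + ((bKeys.drop j).takeWhile (fun k => decide (k < a))).length)
          = bKeys.takeWhile (fun k => decide (k < a)) := by
        rw [hlen]
        exact (List.prefix_iff_eq_take.mp (List.takeWhile_prefix _)).symm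
      have hbelow' : below + (((bKeys.drop j).takeWhile (fun k => decide (k < a))).map
            (fun k => d.getD k 0)).sum = keyCntS d bKeys a := by
        rw [keyCntS, hsplit]; simp [hbe]
      rw [List.foldl_cons]
      simp only [advanceB_eq] at ih ⊢
      rw [ih _ _ _ hpw'
        (by rw [hlen]; exact (List.takeWhile_prefix _).length_le)
        (by
          rw [htake]
          intro k hk a'' ha''
          have hk' := List.mem_takeWhile_imp hk
          have h2 := hle a'' ha''
          simp only [decide_eq_true_eq] at hk'
          omega)
        (by rw [htake]; rw [keyCntS] at hbelow'; exact hbelow')]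
      rw [hbelow']
      simp only [List.map_cons, List.sum_cons]
      ring

-- the per-combination win counts agree
theorem win_eq (La Lb : List Int) :
    (PySem.Dict.counter La).items.foldl
      (fun acc kv => winInnerA kv.1 kv.2 (PySem.Dict.counter Lb)
        (((PySem.List.sorted (PySem.Dict.counter Lb).keys (fun k => k) false).foldl
            (fun (p : List (Int × Int) × Int) k =>
              (p.1 ++ [(k, p.2 + (PySem.Dict.counter Lb).getD k 0)], p.2 + (PySem.Dict.counter Lb).getD k 0))
            ([], 0)).1) acc) 0
    = ((PySem.List.sorted (PySem.Dict.counter La).keys (fun k => k) false).foldl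
        (fun (s : Nat × Int × Int) a =>
          let jb := advanceB (PySem.List.sorted (PySem.Dict.counter Lb).keys (fun k => k) false)
            (PySem.Dict.counter Lb) a s.1 s.2.1
          (jb.1, jb.2, s.2.2 + (PySem.Dict.counter La).getD a 0 * jb.2)) (0, 0, 0)).2.2 := by
  rw [PySem.List.foldl_congr_mem _ _
      (fun acc kv => acc + kv.2 * keyCntS (PySem.Dict.counter Lb)
        (PySem.List.sorted (PySem.Dict.counter Lb).keys (fun k => k) false) kv.1) 0
      (by
        intro acc kv _
        rw [winInnerA_eq, bCum_keys]
        simp)]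
  rw [PySem.List.foldl_add]
  rw [mergeLoop_eq _ _ _ _ 0 0 0
      (PySem.List.sorted_pairwise _ _) (Nat.zero_le _) (by simp) (by simp)]
  simp only [PySem.Dict.items_counter, PySem.Dict.keys_counter, PySem.Dict.getD_counter,
    List.map_map, zero_add]
  exact (((PySem.List.sorted_perm (PySem.Set.ofList La) (fun k => k) false).map _).sum_eq).symm

-- ===== VERDICT (by name: the statement is the Claim_ definition above) =====
theorem solution_spec : Claim_equal_solution := by
  intro dice _
  unfold Spec_solution solution solution_alt
  simp only [getAllSumsA, ← sumsOfB_eq]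
  refine congrArg (fun st : Int × List Int =>
    (PySem.List.sorted st.2 (fun k => k) false).map (fun i => i + 1)) ?_
  apply PySem.List.foldl_congr_mem
  intro st aDice _
  rw [win_eq (sumsOfB dice aDice)
      (sumsOfB dice ((PySem.List.pyRange 0 (dice.length : Int) 1).filter (fun i => !aDice.contains i)))]
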